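-- pv_equiv track=rewrite | github.com/kevincaicedo/vortex | vortex-benchmark/python/vortex_benchmark/models.py | split_csv_values
-- ===== SOURCE A (Python) =====
-- from typing import Any, Optional
--
-- def split_csv_values(values: Optional[list[str]]) -> list[str]:
--     if not values:
--         return []
--
--     seen: set[str] = set()
--     ordered: list[str] = []
--     for raw_value in values:
--         for part in raw_value.split(","):
--             value = part.strip()
--             if not value or value in seen:
--                 continue
--             seen.add(value)
--             ordered.append(value)
--     return ordered
-- ===== SOURCE B (Python) =====
-- from typing import Any, Optional
--
-- def split_csv_values(values: Optional[list[str]]) -> list[str]: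
--     if not values:
--         return []
--     parts = [p.strip() for v in values for p in v.split(",") if p.strip()]
--     # dedup by repeated purging: emit the head, delete every later copy of it,
--     # repeat on what is left (no seen-set / dict membership structure at all)
--     out: list[str] = []
--     while parts:
--         head = parts[0]
--         out.append(head)
--         parts = [p for p in parts[1:] if p != head]
--     return out
-- ===== Notes on version B (the rewrite author's own statement) =====
-- stated objective: alternative
-- what changed: A deduplicates while scanning with an auxiliary seen-set; B first flattens all cleaned parts, then deduplicates with no membership structure at all, by repeatedly emitting the head of the remaining list and filtering out every later copy of it (select-and-purge), a quadratic algorithm with different traversal.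
import Mathlib
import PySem

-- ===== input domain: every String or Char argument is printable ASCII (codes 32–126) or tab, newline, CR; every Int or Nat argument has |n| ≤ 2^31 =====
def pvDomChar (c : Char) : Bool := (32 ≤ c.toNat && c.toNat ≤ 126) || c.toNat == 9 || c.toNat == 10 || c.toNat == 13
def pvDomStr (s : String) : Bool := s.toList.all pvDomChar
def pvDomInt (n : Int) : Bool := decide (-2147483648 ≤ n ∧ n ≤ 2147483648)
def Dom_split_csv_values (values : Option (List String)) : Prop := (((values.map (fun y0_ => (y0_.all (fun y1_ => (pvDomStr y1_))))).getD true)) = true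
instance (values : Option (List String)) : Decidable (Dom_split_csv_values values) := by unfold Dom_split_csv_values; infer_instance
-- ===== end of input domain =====

-- B replaces A's fused dedup-while-scanning loop (seen-set + output list kept in parallel) with a
-- flat split/strip/filter pass followed by a select-and-purge dedup with no membership structure
-- (emit the head, filter out its later copies, repeat); alternative algorithm, same results.

-- ===== PORT A =====
-- raw_value.split(",") with the nonempty literal separator ","
def pvSplitComma (raw : String) : List String := (PySem.Str.split? raw ",").getD []

-- the body of A's inner loop: strip, skip empty or seen, else record in both seen and ordered
def pvStepA (st : PySem.Set String × List String) (part : String) : PySem.Set String × List String :=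
  let v := PySem.Str.strip part
  if v = "" ∨ PySem.Set.contains st.1 v then st
  else (PySem.Set.add st.1 v, st.2 ++ [v])

def split_csv_values (values : Option (List String)) : List String :=
  match values with
  | none => []
  | some vs =>
    if vs = [] then []
    else
      (vs.foldl (fun st raw => (pvSplitComma raw).foldl pvStepA st)
        ((PySem.Set.empty : PySem.Set String), ([] : List String))).2

-- ===== PORT B =====
-- one clause of B's comprehension: [p.strip() for p in v.split(",") if p.strip()]
def pvCleanB (v : String) : List String :=
  ((pvSplitComma v).map PySem.Str.strip).filter (fun p => p ≠ "")

-- B's while loop: emit the head, purge every later copy of it, repeat on the rest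
def pvPurgeDedup (parts : List String) : List String :=
  match parts with
  | [] => []
  | head :: rest => head :: pvPurgeDedup (rest.filter (fun p => p ≠ head))
termination_by parts.length
decreasing_by
  have h : (List.filter (fun x => decide (x.1 ≠ head)) rest.attach).length
      ≤ rest.attach.length := List.length_filter_le _ _
  simp at h ⊢
  omega

def split_csv_values_alt (values : Option (List String)) : List String :=
  match values with
  | none => []
  | some vs =>
    if vs = [] then []
    else pvPurgeDedup (vs.flatMap pvCleanB)

-- ===== PRECONDITION & SPEC =====
def Spec_split_csv_values (values : Option (List String)) (out : List String) : Prop := out = split_csv_values_alt values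
instance (values : Option (List String)) (out : List String) : Decidable (Spec_split_csv_values values out) := by unfold Spec_split_csv_values; infer_instance

-- ===== CLAIM (what is proved, stated in full; the proofs are below) =====
def Claim_equal_split_csv_values : Prop := ∀ (values : Option (List String)), Dom_split_csv_values values → Spec_split_csv_values values (split_csv_values values)

-- ===== LEMMAS AND PROOFS =====

-- A's inner loop on a duplicated state (s, s): both components stay equal and the loop
-- acts as folding Set.add over the stripped, nonempty parts.
lemma innerA_eq (parts : List String) (s : PySem.Set String) :
    parts.foldl pvStepA (s, s)
      = (((parts.map PySem.Str.strip).filter (fun p => p ≠ "")).foldl PySem.Set.add s,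
         ((parts.map PySem.Str.strip).filter (fun p => p ≠ "")).foldl PySem.Set.add s) := by
  induction parts generalizing s with
  | nil => rfl
  | cons p rest ih =>
    rw [List.foldl_cons, List.map_cons, List.filter_cons]
    by_cases h0 : PySem.Str.strip p = ""
    · have h1 : pvStepA (s, s) p = (s, s) := by simp [pvStepA, h0]
      rw [h1, ih]
      simp [h0]
    · by_cases hm : PySem.Str.strip p ∈ s
      · have h1 : pvStepA (s, s) p = (s, s) := by simp [pvStepA, hm]
        have h2 : PySem.Set.add s (PySem.Str.strip p) = s := by
          simp [PySem.Set.add, hm]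
        rw [h1, ih]
        simp [h0, h2]
      · have h2 : PySem.Set.add s (PySem.Str.strip p) = s ++ [PySem.Str.strip p] := by
          simp [PySem.Set.add, hm]
        have h1 : pvStepA (s, s) p
            = (s ++ [PySem.Str.strip p], s ++ [PySem.Str.strip p]) := by
          simp [pvStepA, h0, hm]
        rw [h1, ih]
        simp [h0, h2]

-- A's outer loop equals folding Set.add over B's flat cleaned list.
lemma outerA_eq (vs : List String) (s : PySem.Set String) :
    vs.foldl (fun st raw => (pvSplitComma raw).foldl pvStepA st) (s, s)
      = ((vs.flatMap pvCleanB).foldl PySem.Set.add s,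
         (vs.flatMap pvCleanB).foldl PySem.Set.add s) := by
  induction vs generalizing s with
  | nil => rfl
  | cons v rest ih =>
    rw [List.foldl_cons, List.flatMap_cons, List.foldl_append]
    rw [show (pvSplitComma v).foldl pvStepA (s, s)
          = ((pvCleanB v).foldl PySem.Set.add s, (pvCleanB v).foldl PySem.Set.add s)
        from innerA_eq _ _]
    exact ih _

-- first-occurrence dedup commutes with filtering
lemma ofList_filter (p : String → Bool) (xs : List String) :
    PySem.Set.ofList (xs.filter p) = (PySem.Set.ofList xs).filter p := by
  induction xs with
  | nil => rfl
  | cons x rest ih =>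
    by_cases hx : p x = true
    · rw [List.filter_cons_of_pos hx, PySem.Set.ofList_cons, PySem.Set.ofList_cons,
        List.filter_cons_of_pos hx, ih, PySem.Set.discard, PySem.Set.discard,
        List.filter_filter, List.filter_filter]
      exact congrArg _ (List.filter_congr (fun a _ => Bool.and_comm _ _))
    · rw [List.filter_cons_of_neg (by simpa using hx), PySem.Set.ofList_cons,
        List.filter_cons_of_neg (by simpa using hx), ih, PySem.Set.discard,
        List.filter_filter]
      refine List.filter_congr (fun a _ => ?_)
      by_cases ha : a = x
      · subst ha; simp [hx]
      · simp [ha]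

-- select-and-purge dedup computes first occurrences in order
lemma purgeDedup_eq_ofList (xs : List String) :
    pvPurgeDedup xs = PySem.Set.ofList xs := by
  induction xs using pvPurgeDedup.induct with
  | case1 => rw [pvPurgeDedup]; rfl
  | case2 head rest ih =>
    rw [List.unattach_filter (g := fun p => !decide (p = head)) (hf := fun x h => by simp),
      List.unattach_attach] at ih
    simp only [pvPurgeDedup, ne_eq, decide_not]
    rw [ih, ofList_filter, PySem.Set.ofList_cons, PySem.Set.discard]
    exact congrArg _ (List.filter_congr (fun a _ => by by_cases h : a = head <;> simp [h]))

-- ===== VERDICT (by name: the statement is the Claim_ definition above) =====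
theorem split_csv_values_spec : Claim_equal_split_csv_values := by
  intro values _
  unfold Spec_split_csv_values split_csv_values split_csv_values_alt
  match values with
  | none => rfl
  | some vs =>
    by_cases h : vs = []
    · simp [h]
    · simp only [h, if_false]
      have he : ((PySem.Set.empty : PySem.Set String), ([] : List String))
          = (([] : List String), ([] : List String)) := rfl
      rw [he, outerA_eq, purgeDedup_eq_ofList]
      simp [PySem.Set.ofList_eq_foldl]
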